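-- pv_equiv track=rewrite | github.com/liuxsh9/sft-label | src/sft_label/tools/dashboard_aggregation.py | merge_turn_kinds
-- ===== SOURCE A (Python) =====
-- def merge_turn_kinds(kinds: list[str | None]) -> str | None:
--     has_single = False
--     has_multi = False
--     for kind in kinds:
--         if kind == "mixed":
--             return "mixed"
--         if kind == "single":
--             has_single = True
--         elif kind == "multi":
--             has_multi = True
--     if has_single and has_multi:
--         return "mixed"
--     if has_multi:
--         return "multi"
--     if has_single:
--         return "single"
--     return None
-- ===== SOURCE B (Python) =====
-- _BIT = {"single": 1, "multi": 2, "mixed": 3}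
-- _TABLE = (None, "single", "multi", "mixed")
--
-- def merge_turn_kinds(kinds):
--     bits = 0
--     for kind in kinds:
--         bits |= _BIT.get(kind, 0)
--     return _TABLE[bits]
-- ===== Notes on version B (the rewrite author's own statement) =====
-- stated objective: alternative
-- what changed: Replaces the boolean accumulators, early return and branch ladder with a bitmask encoding: each label maps to a 2-bit mask (single=1, multi=2, mixed=3), the masks are OR-folded into one integer, and the answer is read from a 4-entry lookup table indexed by that integer.
import Mathlib
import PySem

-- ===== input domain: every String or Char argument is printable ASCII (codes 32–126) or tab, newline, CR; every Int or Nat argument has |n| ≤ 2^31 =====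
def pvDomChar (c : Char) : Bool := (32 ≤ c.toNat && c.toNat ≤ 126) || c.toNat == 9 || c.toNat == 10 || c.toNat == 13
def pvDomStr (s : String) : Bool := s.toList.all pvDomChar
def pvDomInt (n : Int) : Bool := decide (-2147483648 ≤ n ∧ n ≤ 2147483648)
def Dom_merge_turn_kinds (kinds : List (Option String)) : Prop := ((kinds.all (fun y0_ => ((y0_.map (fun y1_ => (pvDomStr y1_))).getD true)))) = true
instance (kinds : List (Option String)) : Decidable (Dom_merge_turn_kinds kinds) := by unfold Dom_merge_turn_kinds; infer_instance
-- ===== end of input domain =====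

-- B replaces the boolean accumulators and branch ladder by OR-folding per-label 2-bit masks and a 4-entry table lookup (objective: alternative).


-- ===== PORT A =====
-- the for-loop with its two boolean accumulators and early return, then the final if-chain
def mtkLoop : List (Option String) → Bool → Bool → Option String
  | [], has_single, has_multi =>
    if has_single && has_multi then some "mixed"
    else if has_multi then some "multi"
    else if has_single then some "single"
    else none
  | kind :: rest, has_single, has_multi =>
    if kind == some "mixed" then some "mixed"
    else if kind == some "single" then mtkLoop rest true has_multi
    else if kind == some "multi" then mtkLoop rest has_single true
    else mtkLoop rest has_single has_multi

def merge_turn_kinds (kinds : List (Option String)) : Option String :=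
  mtkLoop kinds false false

-- ===== PORT B =====
-- _BIT.get(kind, 0): the 3-entry dict literal, ported as an exact match on its keys
def mtkBit (k : Option String) : Nat :=
  if k == some "single" then 1
  else if k == some "multi" then 2
  else if k == some "mixed" then 3
  else 0

-- _TABLE = (None, "single", "multi", "mixed")
def mtkTable : List (Option String) := [none, some "single", some "multi", some "mixed"]

-- bits is OR-folded from 2-bit masks so it is always < 4; the tuple index is ported as getD
def merge_turn_kinds_alt (kinds : List (Option String)) : Option String :=
  mtkTable.getD (kinds.foldl (fun b k => b ||| mtkBit k) 0) none

-- ===== PRECONDITION & SPEC =====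
def Spec_merge_turn_kinds (kinds : List (Option String)) (out : Option String) : Prop := out = merge_turn_kinds_alt kinds
instance (kinds : List (Option String)) (out : Option String) : Decidable (Spec_merge_turn_kinds kinds out) := by unfold Spec_merge_turn_kinds; infer_instance

-- ===== CLAIM (what is proved, stated in full; the proofs are below) =====
def Claim_equal_merge_turn_kinds : Prop := ∀ (kinds : List (Option String)), Dom_merge_turn_kinds kinds → Spec_merge_turn_kinds kinds (merge_turn_kinds kinds)

-- ===== LEMMAS AND PROOFS =====

-- the bitmask encoding of a triple of presence booleans
def mtkCode (hs hm hx : Bool) : Nat :=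
  (if hs then 1 else 0) ||| (if hm then 2 else 0) ||| (if hx then 3 else 0)

theorem mtkCode_or_bit (hs hm hx : Bool) (k : Option String) :
    mtkCode hs hm hx ||| mtkBit k =
      mtkCode (hs || k == some "single") (hm || k == some "multi") (hx || k == some "mixed") := by
  by_cases h1 : k = some "single"
  · subst h1; cases hs <;> cases hm <;> cases hx <;> decide
  · by_cases h2 : k = some "multi"
    · subst h2; cases hs <;> cases hm <;> cases hx <;> decide
    · by_cases h3 : k = some "mixed"
      · subst h3; cases hs <;> cases hm <;> cases hx <;> decide
      · have e1 : (k == some "single") = false := by simp [h1]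
        have e2 : (k == some "multi") = false := by simp [h2]
        have e3 : (k == some "mixed") = false := by simp [h3]
        simp [mtkBit, e1, e2, e3]

theorem mtk_fold_code (ks : List (Option String)) : ∀ (hs hm hx : Bool),
    ks.foldl (fun b k => b ||| mtkBit k) (mtkCode hs hm hx) =
      mtkCode (hs || ks.contains (some "single")) (hm || ks.contains (some "multi"))
        (hx || ks.contains (some "mixed")) := by
  induction ks with
  | nil => intro hs hm hx; simp
  | cons k rest ih =>
    intro hs hm hx
    have hb : ∀ (x : Option String), (x == k) = (k == x) := fun x => by rw [BEq.comm]
    simp only [List.foldl_cons, mtkCode_or_bit, ih, List.contains_cons, Bool.or_assoc, hb]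

theorem mtkLoop_char (ks : List (Option String)) : ∀ (hs hm : Bool),
    mtkLoop ks hs hm =
      if ks.contains (some "mixed")
          || ((hs || ks.contains (some "single")) && (hm || ks.contains (some "multi"))) then some "mixed"
      else if hm || ks.contains (some "multi") then some "multi"
      else if hs || ks.contains (some "single") then some "single"
      else none := by
  induction ks with
  | nil => intro hs hm; simp [mtkLoop]
  | cons k rest ih =>
    intro hs hm
    by_cases h1 : k = some "mixed"
    · subst h1; simp [mtkLoop]
    · by_cases h2 : k = some "single"
      · subst h2; simp [mtkLoop, ih]
      · by_cases h3 : k = some "multi"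
        · subst h3; simp [mtkLoop, ih]
        · simp [mtkLoop, h1, h2, h3, ih, Ne.symm h1, Ne.symm h2, Ne.symm h3]

-- ===== VERDICT (by name: the statement is the Claim_ definition above) =====
theorem merge_turn_kinds_spec : Claim_equal_merge_turn_kinds := by
  intro kinds _
  unfold Spec_merge_turn_kinds merge_turn_kinds merge_turn_kinds_alt
  have h0 : (0 : Nat) = mtkCode false false false := by decide
  rw [h0, mtk_fold_code, mtkLoop_char]
  simp only [Bool.false_or]
  cases hS : kinds.contains (some "single") <;> cases hM : kinds.contains (some "multi") <;>
    cases hX : kinds.contains (some "mixed") <;> decide
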